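-- pv_equiv track=rewrite | github.com/AdamZhouSE/pythonHomework | Code/CodeRecords/2594/58610/253415.py | solution
-- ===== SOURCE A (Python) =====
-- def solution(s: str) -> int:
--     word_index = dict()
--     max_len = -1
--     for index in range(len(s)):
--         if word_index.get(s[index], -1) == -1:
--             word_index[s[index]] = index
--         max_len = max(index - word_index.get(s[index], len(s)) - 1, max_len)
--     return max_len
-- ===== SOURCE B (Python) =====
-- def solution(s: str) -> int:
--     best = -1
--     for c in set(s):
--         best = max(best, s.rindex(c) - s.index(c) - 1)
--     return best
-- ===== Notes on version B (the rewrite author's own statement) =====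
-- stated objective: simpler
-- what changed: Instead of A's positional scan maintaining a first-occurrence dict and updating a running max at every index, B loops over the distinct characters and takes the max of s.rindex(c) - s.index(c) - 1 per character, seeded at -1.
import Mathlib
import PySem

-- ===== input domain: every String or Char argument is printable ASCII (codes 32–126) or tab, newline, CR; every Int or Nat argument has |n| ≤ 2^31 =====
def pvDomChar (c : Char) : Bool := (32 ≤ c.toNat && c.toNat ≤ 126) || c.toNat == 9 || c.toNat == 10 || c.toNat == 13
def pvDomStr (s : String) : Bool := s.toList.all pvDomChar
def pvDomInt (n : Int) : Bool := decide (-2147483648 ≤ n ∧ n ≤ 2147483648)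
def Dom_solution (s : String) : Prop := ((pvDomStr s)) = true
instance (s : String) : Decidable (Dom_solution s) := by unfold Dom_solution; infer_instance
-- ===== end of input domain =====

-- B replaces A's positional scan with a first-occurrence dict by a max over the distinct
-- characters of (last occurrence - first occurrence - 1); same return value, simpler loop.

-- ===== PORT A =====
-- for index in range(len(s)): first-occurrence dict + running max
-- (index is always in range, so pyGetD's default ' ' is never used)
def solution (s : String) : Int :=
  ((PySem.List.pyRange 0 (PySem.Str.len s) 1).foldl
    (fun (st : PySem.Dict Char Int × Int) index =>
      let c := PySem.List.pyGetD s.toList index ' '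
      let d := if PySem.Dict.getD st.1 c (-1) == -1 then PySem.Dict.insert st.1 c index else st.1
      (d, max (index - PySem.Dict.getD d c (PySem.Str.len s) - 1) st.2))
    (PySem.Dict.empty, -1)).2

-- ===== PORT B =====
-- for c in set(s): best = max(best, s.rindex(c) - s.index(c) - 1)
-- s.rindex(c) / s.index(c) are PySem.Chars.rfind / find with the one-char needle (c occurs in s,
-- so rindex/index do not raise and rindex agrees with rfind); the running max does not depend on
-- the set's iteration order.
def solution_alt (s : String) : Int :=
  (PySem.Set.ofList s.toList).foldl
    (fun best c =>
      max best (PySem.Chars.rfind s.toList [c] - PySem.Chars.find s.toList [c] - 1))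
    (-1)

-- ===== PRECONDITION & SPEC =====
def Spec_solution (s : String) (out : Int) : Prop := out = solution_alt s
instance (s : String) (out : Int) : Decidable (Spec_solution s out) := by unfold Spec_solution; infer_instance

-- ===== CLAIM (what is proved, stated in full; the proofs are below) =====
def Claim_equal_solution : Prop := ∀ (s : String), Dom_solution s → Spec_solution s (solution s)

-- ===== LEMMAS AND PROOFS =====

-- A's loop body, as a function of the (index, character) pair; n stands for len(s)
-- (the getD default Python never uses: the key was just inserted if absent).
def pvBodyA (n : Int) (st : PySem.Dict Char Int × Int) (p : Int × Char) : PySem.Dict Char Int × Int :=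
  let d := if PySem.Dict.getD st.1 p.2 (-1) == -1 then PySem.Dict.insert st.1 p.2 p.1 else st.1
  (d, max (p.1 - PySem.Dict.getD d p.2 n - 1) st.2)

-- A's loop state after scanning l
def pvStA (n : Int) (l : List Char) : PySem.Dict Char Int × Int :=
  (PySem.List.enumerate l 0).foldl (pvBodyA n) (PySem.Dict.empty, -1)

-- first-occurrence index as an Int (only used where c ∈ l)
def pvFirst (l : List Char) (c : Char) : Int := (((PySem.List.index? l c).getD 0 : Nat) : Int)

-- the value A's scan contributes at enumerated position p
def pvGap (l : List Char) (p : Int × Char) : Int := p.1 - pvFirst l p.2 - 1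

-- the value B contributes for character c
def pvGapB (l : List Char) (c : Char) : Int :=
  PySem.Chars.rfind l [c] - PySem.Chars.find l [c] - 1

lemma pvSolution_eq_stA (s : String) : solution s = (pvStA (PySem.Str.len s) s.toList).2 := by
  unfold solution pvStA pvBodyA
  rw [PySem.List.enumerate_eq_map_pyRange s.toList ' ', List.foldl_map]
  simp [PySem.Str.len, PySem.List.len]

lemma pvMem_enumerate_iff (l : List Char) (p : Int × Char) :
    p ∈ PySem.List.enumerate l 0 ↔ ∃ k : Nat, p.1 = (k : Int) ∧ l[k]? = some p.2 := by
  rw [PySem.List.enumerate_eq_zipIdx_map]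
  simp only [List.mem_map]
  constructor
  · rintro ⟨q, hq, rfl⟩
    exact ⟨q.2, by simp, by rw [← List.mem_zipIdx_iff_getElem?]; exact hq⟩
  · rintro ⟨k, h1, h2⟩
    refine ⟨(p.2, k), ?_, ?_⟩
    · rw [List.mem_zipIdx_iff_getElem?]; exact h2
    · simp [← h1]

lemma pvStA_append (n : Int) (l : List Char) (c : Char) :
    pvStA n (l ++ [c]) = pvBodyA n (pvStA n l) ((l.length : Int), c) := by
  unfold pvStA
  rw [PySem.List.enumerate_append, List.foldl_append]
  rw [PySem.List.enumerate_eq_zipIdx_map [c]]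
  simp

lemma pvStA_fst (n : Int) (l : List Char) (c : Char) :
    (pvStA n l).1.get? c = (PySem.List.index? l c).map (fun k => (k : Int)) := by
  induction l using List.reverseRecOn generalizing c with
  | nil =>
    simp [pvStA, PySem.List.enumerate_eq_zipIdx_map, PySem.Dict.get?_empty]
  | append_singleton l c0 ih =>
    rw [pvStA_append]
    unfold pvBodyA
    by_cases hc : c0 ∈ l
    · obtain ⟨k, hk⟩ := Option.isSome_iff_exists.1 ((PySem.List.index?_isSome_iff l c0).2 hc)
      have h2 : ¬ ((pvStA n l).1.getD c0 (-1) == (-1 : Int)) = true := by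
        rw [PySem.Dict.getD_eq_get?_getD, ih c0, hk]; simp
      simp only [h2, Bool.false_eq_true, if_false]
      rw [ih c]
      by_cases hcl : c ∈ l
      · rw [PySem.List.index?_append_of_mem [c0] hcl]
      · have hne : c ≠ c0 := fun h => hcl (h ▸ hc)
        rw [(PySem.List.index?_eq_none_iff l c).2 hcl,
            (PySem.List.index?_eq_none_iff (l ++ [c0]) c).2 (by simp [hcl, hne])]
    · have h1 : ((pvStA n l).1.getD c0 (-1) == (-1 : Int)) = true := by
        rw [PySem.Dict.getD_eq_get?_getD, ih c0,
          (PySem.List.index?_eq_none_iff l c0).2 hc]; simp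
      simp only [h1, if_true]
      by_cases hcc : c = c0
      · subst hcc
        rw [PySem.Dict.get?_insert_self, PySem.List.index?_append_singleton_self l c hc]
        rfl
      · rw [PySem.Dict.get?_insert_of_ne _ _ hcc, ih c]
        by_cases hcl : c ∈ l
        · rw [PySem.List.index?_append_of_mem [c0] hcl]
        · rw [(PySem.List.index?_eq_none_iff l c).2 hcl,
            (PySem.List.index?_eq_none_iff (l ++ [c0]) c).2 (by simp [hcl, hcc])]

lemma pvStA_snd (n : Int) (l : List Char) :
    (pvStA n l).2 = ((PySem.List.enumerate l 0).map (pvGap l)).foldl max (-1) := by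
  induction l using List.reverseRecOn with
  | nil => simp [pvStA, PySem.List.enumerate_eq_zipIdx_map]
  | append_singleton l c0 ih =>
    rw [pvStA_append]
    have hmap : (PySem.List.enumerate (l ++ [c0]) 0).map (pvGap (l ++ [c0])) =
        (PySem.List.enumerate l 0).map (pvGap l) ++ [pvGap (l ++ [c0]) ((l.length : Int), c0)] := by
      rw [PySem.List.enumerate_append, List.map_append]
      congr 1
      · apply List.map_congr_left
        intro p hp
        have hp2 : p.2 ∈ l := by
          obtain ⟨k, _, hk⟩ := (pvMem_enumerate_iff l p).1 hp
          exact List.mem_of_getElem? hk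
        unfold pvGap pvFirst
        rw [PySem.List.index?_append_of_mem [c0] hp2]
      · rw [PySem.List.enumerate_eq_zipIdx_map]; simp
    rw [hmap, List.foldl_append]
    simp only [List.foldl_cons, List.foldl_nil]
    rw [← ih]
    unfold pvBodyA
    by_cases hc : c0 ∈ l
    · obtain ⟨k, hk⟩ := Option.isSome_iff_exists.1 ((PySem.List.index?_isSome_iff l c0).2 hc)
      have h2 : ¬ ((pvStA n l).1.getD c0 (-1) == (-1 : Int)) = true := by
        rw [PySem.Dict.getD_eq_get?_getD, pvStA_fst n l c0, hk]; simp
      simp only [h2, Bool.false_eq_true, if_false]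
      have h3 : (pvStA n l).1.getD c0 n = (k : Int) := by
        rw [PySem.Dict.getD_eq_get?_getD, pvStA_fst n l c0, hk]; rfl
      unfold pvGap pvFirst
      rw [PySem.List.index?_append_of_mem [c0] hc, hk]
      simp [h3, max_comm]
    · have h1 : ((pvStA n l).1.getD c0 (-1) == (-1 : Int)) = true := by
        rw [PySem.Dict.getD_eq_get?_getD, pvStA_fst n l c0,
          (PySem.List.index?_eq_none_iff l c0).2 hc]; simp
      simp only [h1, if_true]
      have h3 : ((pvStA n l).1.insert c0 (l.length : Int)).getD c0 n = (l.length : Int) := by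
        rw [PySem.Dict.getD_eq_get?_getD, PySem.Dict.get?_insert_self]; rfl
      unfold pvGap pvFirst
      rw [PySem.List.index?_append_singleton_self l c0 hc]
      simp [h3, max_comm]

lemma pvSingleton_isPrefixOf_iff (c : Char) (t : List Char) :
    ([c].isPrefixOf t = true) ↔ t.head? = some c := by
  cases t with
  | nil => simp [List.isPrefixOf]
  | cons h t => simp [List.isPrefixOf]; exact eq_comm

lemma pvPrefix_singleton_iff (c : Char) (l : List Char) (i : Nat) :
    [c] <+: l.drop i ↔ l[i]? = some c := by
  rw [← List.head?_drop]
  constructor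
  · rintro ⟨t, ht⟩; rw [← ht]; rfl
  · intro h
    cases hd : l.drop i with
    | nil => rw [hd] at h; simp at h
    | cons a t => rw [hd] at h; simp at h; exact ⟨t, by simp [h]⟩

lemma pvFind_singleton (l : List Char) (c : Char) (h : c ∈ l) :
    PySem.Chars.find l [c] = pvFirst l c := by
  obtain ⟨k, hk⟩ := Option.isSome_iff_exists.1 ((PySem.List.index?_isSome_iff l c).2 h)
  obtain ⟨hklt, hkc, hkmin⟩ := PySem.List.getElem_of_index?_eq_some hk
  have hinf : [c] <:+: l := by
    obtain ⟨pre, suf, hps, -, -⟩ := (PySem.List.index?_eq_some_iff l c k).1 hk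
    exact ⟨pre, suf, by rw [hps]; simp⟩
  have h0 : 0 ≤ PySem.Chars.find l [c] := (PySem.Chars.find_nonneg_iff l [c]).2 hinf
  obtain ⟨hpre, hmin⟩ := PySem.Chars.find_spec h0
  set k0 := (PySem.Chars.find l [c]).toNat with hk0
  have hk0c : l[k0]? = some c := (pvPrefix_singleton_iff c l k0).1 hpre
  have hk0lt : k0 < l.length := (List.getElem?_eq_some_iff.1 hk0c).1
  have e1 : ¬ k0 < k := fun hlt => hkmin k0 hlt (by
    have := List.getElem?_eq_some_iff.1 hk0c; exact this.2)
  have e2 : ¬ k < k0 := fun hlt => hmin k hlt ((pvPrefix_singleton_iff c l k).2 (by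
    rw [List.getElem?_eq_some_iff]; exact ⟨hklt, hkc⟩))
  have : k0 = k := by omega
  unfold pvFirst
  rw [hk]
  simp only [Option.getD_some]
  omega

lemma pvRfind_go_zero (l : List Char) (c : Char) :
    PySem.Chars.rfind.go l [c] 0 = if [c].isPrefixOf l then (0 : Int) else -1 := by
  rw [PySem.Chars.rfind.go]

lemma pvRfind_go_succ (l : List Char) (c : Char) (j : Nat) :
    PySem.Chars.rfind.go l [c] (j + 1) =
      if [c].isPrefixOf (l.drop (j + 1)) then ((j : Int) + 1) else PySem.Chars.rfind.go l [c] j := by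
  rw [PySem.Chars.rfind.go]; push_cast; rfl

lemma pvRfind_go_spec (l : List Char) (c : Char) (j : Nat) :
    (PySem.Chars.rfind.go l [c] j = -1 ∧ ∀ i, i ≤ j → l[i]? ≠ some c) ∨
    (∃ k, k ≤ j ∧ PySem.Chars.rfind.go l [c] j = (k : Int) ∧ l[k]? = some c ∧
      ∀ i, k < i → i ≤ j → l[i]? ≠ some c) := by
  induction j with
  | zero =>
    rw [pvRfind_go_zero]
    by_cases h : l[0]? = some c
    · rw [if_pos]
      · exact Or.inr ⟨0, le_refl 0, rfl, h, fun i h1 h2 => absurd (Nat.lt_of_lt_of_le h1 h2) (by omega)⟩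
      · rw [pvSingleton_isPrefixOf_iff, List.head?_eq_getElem?]; exact h
    · rw [if_neg]
      · exact Or.inl ⟨rfl, fun i hi => by rw [Nat.le_zero.1 hi]; exact h⟩
      · rw [pvSingleton_isPrefixOf_iff, List.head?_eq_getElem?]; exact h
  | succ j ih =>
    rw [pvRfind_go_succ]
    by_cases h : l[j+1]? = some c
    · rw [if_pos]
      · exact Or.inr ⟨j + 1, le_refl _, rfl, h, fun i h1 h2 => absurd (Nat.lt_of_lt_of_le h1 h2) (by omega)⟩
      · rw [pvSingleton_isPrefixOf_iff, List.head?_drop]; exact h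
    · rw [if_neg]
      · rcases ih with ⟨h1, h2⟩ | ⟨k, hk1, hk2, hk3, hk4⟩
        · refine Or.inl ⟨h1, fun i hi => ?_⟩
          rcases Nat.lt_or_ge i (j+1) with hlt | hge
          · exact h2 i (by omega)
          · have : i = j + 1 := by omega
            rw [this]; exact h
        · refine Or.inr ⟨k, by omega, hk2, hk3, fun i hi1 hi2 => ?_⟩
          rcases Nat.lt_or_ge i (j+1) with hlt | hge
          · exact hk4 i hi1 (by omega)
          · have : i = j + 1 := by omega
            rw [this]; exact h
      · rw [pvSingleton_isPrefixOf_iff, List.head?_drop]; exact h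

lemma pvRfind_singleton (l : List Char) (c : Char) (h : c ∈ l) :
    ∃ k : Nat, PySem.Chars.rfind l [c] = (k : Int) ∧ l[k]? = some c ∧
      ∀ i, k < i → l[i]? ≠ some c := by
  have hgo := pvRfind_go_spec l c l.length
  rcases hgo with ⟨-, h2⟩ | ⟨k, -, hk2, hk3, hk4⟩
  · obtain ⟨i, hi⟩ := List.mem_iff_getElem?.1 h
    have hilt : i < l.length := (List.getElem?_eq_some_iff.1 hi).1
    exact absurd hi (h2 i (by omega))
  · refine ⟨k, hk2, hk3, fun i hi => ?_⟩
    rcases Nat.lt_or_ge i (l.length + 1) with hlt | hge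
    · exact hk4 i hi (by omega)
    · intro hc'
      have := (List.getElem?_eq_some_iff.1 hc').1
      omega

lemma pvSolution_alt_eq (s : String) :
    solution_alt s = ((PySem.Set.ofList s.toList).map (pvGapB s.toList)).foldl max (-1) := by
  unfold solution_alt pvGapB
  rw [List.foldl_map]

lemma pvFoldl_max_le (a : Int) (xs ys : List Int) (h : ∀ x ∈ xs, ∃ y ∈ ys, x ≤ y) :
    xs.foldl max a ≤ ys.foldl max a := by
  rcases PySem.List.foldl_max_mem xs a with h0 | hx
  · rw [h0]; exact (PySem.List.le_foldl_max ys a).1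
  · obtain ⟨y, hy, hxy⟩ := h _ hx
    exact le_trans hxy ((PySem.List.le_foldl_max ys a).2 y hy)

-- ===== VERDICT (by name: the statement is the Claim_ definition above) =====
theorem solution_spec : Claim_equal_solution := by
  intro s _
  unfold Spec_solution
  rw [pvSolution_eq_stA, pvStA_snd, pvSolution_alt_eq]
  apply le_antisymm
  · apply pvFoldl_max_le
    intro x hx
    obtain ⟨p, hp, rfl⟩ := List.mem_map.1 hx
    obtain ⟨k, hpk, hk⟩ := (pvMem_enumerate_iff s.toList p).1 hp
    have hcl : p.2 ∈ s.toList := List.mem_of_getElem? hk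
    refine ⟨pvGapB s.toList p.2,
      List.mem_map_of_mem ((PySem.Set.mem_ofList s.toList p.2).2 hcl), ?_⟩
    unfold pvGap pvGapB
    rw [pvFind_singleton s.toList p.2 hcl]
    obtain ⟨m, hm1, hm2, hm3⟩ := pvRfind_singleton s.toList p.2 hcl
    have hkm : k ≤ m := by
      by_contra hgt
      exact hm3 k (by omega) hk
    rw [hm1, hpk]
    omega
  · apply pvFoldl_max_le
    intro y hy
    obtain ⟨c, hc, rfl⟩ := List.mem_map.1 hy
    have hcl : c ∈ s.toList := (PySem.Set.mem_ofList s.toList c).1 hc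
    obtain ⟨m, hm1, hm2, hm3⟩ := pvRfind_singleton s.toList c hcl
    refine ⟨pvGap s.toList ((m : Int), c),
      List.mem_map_of_mem ((pvMem_enumerate_iff s.toList _).2 ⟨m, rfl, hm2⟩), ?_⟩
    unfold pvGap pvGapB
    rw [pvFind_singleton s.toList c hcl, hm1]
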